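-- pv_equiv track=rewrite | github.com/mfrancis33/fef | serpent.py | bitstring
-- ===== SOURCE A (Python) =====
-- def bitstring(n, l):
-- 	# Convert num to bitstring
--
-- 	if l < 1:
-- 		# Must have at least 1 character in a bitstring
-- 		raise ValueError("a bitstring must have at least 1 char")
-- 	if n < 0:
-- 		# Only works with positive ints
-- 		raise ValueError("bitstring representation undefined for neg numbers")
--
-- 	# Convert num to bitstring
-- 	result = ""
-- 	while n > 0:
-- 		result += "0" if n & 1 == 0 else "1"
-- 		n >>= 1
--
-- 	# Pad with 0s to fill rest of space if necessary
-- 	if len(result) < l: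
-- 		result = result + ("0" * (l - len(result)))
--
-- 	return result
-- ===== SOURCE B (Python) =====
-- def bitstring(n, l):
-- 	if l < 1:
-- 		raise ValueError("a bitstring must have at least 1 char")
-- 	if n < 0:
-- 		raise ValueError("bitstring representation undefined for neg numbers")
-- 	# position i of the output is bit i of n; zeros beyond bit_length are the padding
-- 	return "".join("1" if (n >> i) & 1 else "0" for i in range(max(l, n.bit_length())))
-- ===== Notes on version B (the rewrite author's own statement) =====
-- stated objective: alternative
-- what changed: Replaces A's destructive while-loop (peel bits off n, then a separate padding step) with a single indexed pass: character i is bit i of n via (n >> i) & 1 over range(max(l, n.bit_length())), so padding falls out of the zero high bits with no second phase.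
import Mathlib
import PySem

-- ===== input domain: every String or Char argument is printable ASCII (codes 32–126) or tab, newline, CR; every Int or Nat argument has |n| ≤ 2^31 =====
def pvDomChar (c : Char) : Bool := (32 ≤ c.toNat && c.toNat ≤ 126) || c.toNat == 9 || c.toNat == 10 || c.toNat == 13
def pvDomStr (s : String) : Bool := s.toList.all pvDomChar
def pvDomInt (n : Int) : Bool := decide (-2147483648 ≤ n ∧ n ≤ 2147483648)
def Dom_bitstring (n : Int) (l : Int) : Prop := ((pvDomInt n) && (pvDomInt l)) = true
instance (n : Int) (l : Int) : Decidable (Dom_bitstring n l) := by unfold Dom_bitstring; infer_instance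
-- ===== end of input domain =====

-- B builds the string by indexing bits (char i = bit i of n over range(max(l, bit_length))),
-- replacing A's bit-peeling while-loop followed by a padding phase.

-- ===== PORT A =====
-- A's while-loop: result += bit(n&1); n >>= 1.  With n ≥ 0 (guarded), n equals its toNat,
-- so the loop is structural recursion on a Nat.
def aLoop (m : Nat) : List Char :=
  if m = 0 then []
  else (if m % 2 = 0 then '0' else '1') :: aLoop (m / 2)
decreasing_by exact Nat.div_lt_self (Nat.pos_of_ne_zero (by assumption)) (by decide)

def bitstring (n : Int) (l : Int) : String :=
  if l < 1 then ""        -- Python raises ValueError here: excluded by Pre_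
  else if n < 0 then ""   -- Python raises ValueError here: excluded by Pre_
  else
    let result := aLoop n.toNat
    if (result.length : Int) < l then
      String.ofList (result ++ List.replicate (l - (result.length : Int)).toNat '0')
    else String.ofList result

-- ===== PORT B =====
-- Python's int.bit_length (0 for 0, floor(log2 m)+1 otherwise).
def bitLen (m : Nat) : Nat := if m = 0 then 0 else m.log2 + 1

def bitstring_alt (n : Int) (l : Int) : String :=
  if l < 1 then ""        -- Python raises ValueError here: excluded by Pre_
  else if n < 0 then ""   -- Python raises ValueError here: excluded by Pre_
  else
    String.ofList ((List.range (max l.toNat (bitLen n.toNat))).map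
      (fun i => if (n.toNat >>> i) % 2 = 1 then '1' else '0'))

-- ===== PRECONDITION & SPEC =====
-- A raises ValueError when l < 1 or n < 0; exactly those inputs are excluded.
def Pre_bitstring (n : Int) (l : Int) : Prop := 1 ≤ l ∧ 0 ≤ n
instance (n : Int) (l : Int) : Decidable (Pre_bitstring n l) := by unfold Pre_bitstring; infer_instance
def pvWitness_bitstring : Int × Int := (5, 8)

def Spec_bitstring (n : Int) (l : Int) (out : String) : Prop := out = bitstring_alt n l
instance (n : Int) (l : Int) (out : String) : Decidable (Spec_bitstring n l out) := by unfold Spec_bitstring; infer_instance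

-- ===== CLAIM (what is proved, stated in full; the proofs are below) =====
def Claim_equal_bitstring : Prop := ∀ (n : Int) (l : Int), Dom_bitstring n l → Pre_bitstring n l → Spec_bitstring n l (bitstring n l)

-- ===== LEMMAS AND PROOFS =====

-- single bit-extraction function both sides reduce to
def bitChar (m i : Nat) : Char := if (m >>> i) % 2 = 1 then '1' else '0'

theorem bitLen_pos_eq (m : Nat) (h : m ≠ 0) : bitLen m = bitLen (m / 2) + 1 := by
  unfold bitLen
  rcases Nat.lt_or_ge m 2 with h2 | h2
  · have : m = 1 := by omega
    subst this; decide
  · have hd : m / 2 ≠ 0 := by omega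
    rw [if_neg h, if_neg hd, Nat.log2_eq_log_two, Nat.log2_eq_log_two,
      Nat.log_div_base 2 m, Nat.sub_add_cancel]
    exact Nat.succ_le_of_lt (Nat.log_pos (by decide) h2)

-- A's loop produces exactly the first bitLen m bit-characters, LSB first.
theorem aLoop_eq_range (m : Nat) : aLoop m = (List.range (bitLen m)).map (bitChar m) := by
  induction m using Nat.strong_induction_on with
  | _ m ih =>
    by_cases h : m = 0
    · subst h; rw [aLoop]; rfl
    · rw [aLoop, if_neg h, bitLen_pos_eq m h, List.range_succ_eq_map, List.map_cons,
        List.map_map, ih (m / 2) (Nat.div_lt_self (Nat.pos_of_ne_zero h) (by decide))]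
      congr 1
      · rcases Nat.mod_two_eq_zero_or_one m with hp | hp <;>
          simp [bitChar, hp]
      · apply List.map_congr_left
        intro i _
        unfold bitChar
        simp [Function.comp, Nat.shiftRight_succ_inside]

-- bits at or beyond bitLen m are zero
theorem bitChar_high (m i : Nat) (h : bitLen m ≤ i) : bitChar m i = '0' := by
  unfold bitChar
  have hz : m >>> i = 0 := by
    rw [Nat.shiftRight_eq_div_pow]
    apply Nat.div_eq_of_lt
    calc m < 2 ^ bitLen m := by
            unfold bitLen
            by_cases h0 : m = 0
            · subst h0; simp
            · rw [if_neg h0]; exact Nat.lt_log2_self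
         _ ≤ 2 ^ i := Nat.pow_le_pow_right (by decide) h
  simp [hz]

-- padding the range-map with zeros extends the range
theorem range_map_pad (m a b : Nat) (h : bitLen m ≤ a) :
    (List.range a).map (bitChar m) ++ List.replicate b '0' = (List.range (a + b)).map (bitChar m) := by
  rw [List.range_add, List.map_append]
  congr 1
  symm
  rw [List.map_map]
  apply List.eq_replicate_iff.mpr
  refine ⟨by simp, ?_⟩
  intro c hc
  simp only [List.mem_map, List.mem_range, Function.comp] at hc
  obtain ⟨i, _, rfl⟩ := hc
  exact bitChar_high m (a + i) (by omega)

-- ===== VERDICT (by name: the statement is the Claim_ definition above) =====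
theorem bitstring_spec : Claim_equal_bitstring := by
  intro n l _ hpre
  obtain ⟨hl, hn⟩ := hpre
  unfold Spec_bitstring bitstring bitstring_alt
  have g1 : ¬ (l < 1) := by omega
  have g2 : ¬ (n < 0) := by omega
  simp only [if_neg g1, if_neg g2]
  set m := n.toNat with hm
  have hB : (fun i => if (m >>> i) % 2 = 1 then '1' else '0') = bitChar m := rfl
  rw [hB, aLoop_eq_range m]
  have hlen : (((List.range (bitLen m)).map (bitChar m)).length : Int) = (bitLen m : Int) := by simp
  by_cases hlt : ((((List.range (bitLen m)).map (bitChar m)).length : Int) < l)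
  · rw [if_pos hlt]
    have hble : bitLen m ≤ l.toNat := by rw [hlen] at hlt; omega
    have hmax : max l.toNat (bitLen m) = l.toNat := by omega
    rw [hmax]
    congr 1
    rw [hlen]
    have harith : l.toNat = bitLen m + (l - (bitLen m : Int)).toNat := by
      rw [hlen] at hlt; omega
    rw [range_map_pad m (bitLen m) ((l - (bitLen m : Int)).toNat) le_rfl, ← harith]
  · rw [if_neg hlt]
    have hge : l.toNat ≤ bitLen m := by rw [hlen] at hlt; omega
    have hmax : max l.toNat (bitLen m) = bitLen m := by omega
    rw [hmax]
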